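-- pv_equiv track=rewrite | github.com/herohuyongtao/deeptag-pytorch | fiducial_marker/unit_runetag.py | slot_codes_to_binary_ids
-- ===== SOURCE A (Python) =====
-- def slot_codes_to_binary_ids(codes, num_layers = 3, is_outer_first = False):
--
--     sub_codes = {}
--     for ii in range(2**num_layers-1):
--         sub_code = []
--         num = ii +1
--         for _ in range(num_layers):
--             sub_code.append(num % 2)
--             num //=2
--         if is_outer_first:
--             # from outer to inner
--             sub_code = sub_code[::-1]
--         sub_codes[ii] = sub_code
--
--     # from inside to outside
--     binary_ids = []
--     for code in codes:
--         for ii in range(num_layers):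
--             binary_ids.append(sub_codes[code][ii])
--
--     return binary_ids
-- ===== SOURCE B (Python) =====
-- def slot_codes_to_binary_ids(codes, num_layers=3, is_outer_first=False):
--     # Decompose each code+1 into its bits directly; no precomputed table.
--     binary_ids = []
--     for code in codes:
--         num = code + 1
--         bits = [(num >> k) & 1 for k in range(num_layers)]
--         if is_outer_first:
--             bits.reverse()
--         binary_ids.extend(bits)
--     return binary_ids
-- ===== Notes on version B (the rewrite author's own statement) =====
-- stated objective: alternative
-- what changed: B extracts the num_layers bits of code+1 directly per code with shift-and-mask instead of precomputing a dict table of all 2^num_layers-1 sub-codes and indexing into it bit by bit.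
import Mathlib
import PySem

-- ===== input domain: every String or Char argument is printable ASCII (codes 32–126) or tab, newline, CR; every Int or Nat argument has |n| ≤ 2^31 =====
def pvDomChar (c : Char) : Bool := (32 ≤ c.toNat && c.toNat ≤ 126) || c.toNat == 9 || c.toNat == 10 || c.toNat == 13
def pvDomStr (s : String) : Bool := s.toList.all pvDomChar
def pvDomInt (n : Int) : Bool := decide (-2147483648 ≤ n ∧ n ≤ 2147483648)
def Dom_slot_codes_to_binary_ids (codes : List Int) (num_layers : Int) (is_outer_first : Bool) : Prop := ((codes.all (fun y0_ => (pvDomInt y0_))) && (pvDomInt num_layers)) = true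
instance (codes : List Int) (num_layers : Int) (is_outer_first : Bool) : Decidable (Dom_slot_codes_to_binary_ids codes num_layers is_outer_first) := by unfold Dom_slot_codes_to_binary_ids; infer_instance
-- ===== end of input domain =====

-- B replaces A's precomputed dict of all 2^num_layers-1 sub-codes by direct per-code bit extraction.

-- ===== PORT A =====
-- literal port of A: build the sub_codes dict over range(2**num_layers-1), then index it bit by bit.
-- 'sub_code[::-1]' is ported as List.reverse (exact: the full reversed slice is the reversal).
def slot_codes_to_binary_ids (codes : List Int) (num_layers : Int) (is_outer_first : Bool) : List Int :=
  let sub_codes : PySem.Dict Int (List Int) :=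
    (PySem.List.pyRange 0 ((2 : Int) ^ num_layers.toNat - 1) 1).foldl (fun d ii =>
      let st := (List.range num_layers.toNat).foldl
        (fun (st : List Int × Int) _ => (st.1 ++ [PySem.Int.mod st.2 2], PySem.Int.floordiv st.2 2))
        (([] : List Int), ii + 1)
      let sub_code := if is_outer_first then st.1.reverse else st.1
      d.insert ii sub_code) PySem.Dict.empty
  codes.foldl (fun acc code =>
    (List.range num_layers.toNat).foldl (fun acc (ii : Nat) =>
      acc ++ [PySem.List.pyGetD (sub_codes.getD code []) (ii : Int) 0]) acc) []

-- ===== PORT B =====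
-- literal port of Source B: for each code, bits = [(num >> k) & 1 for k in range(num_layers)], reversed if outer-first, extended.
def slot_codes_to_binary_ids_alt (codes : List Int) (num_layers : Int) (is_outer_first : Bool) : List Int :=
  codes.foldl (fun acc code =>
    let num := code + 1
    let bits := (List.range num_layers.toNat).map (fun (k : Nat) => PySem.Int.band (num >>> (k : Int)) 1)
    let bits := if is_outer_first then bits.reverse else bits
    acc ++ bits) []

-- ===== PRECONDITION & SPEC =====
-- Pre_ excludes exactly the inputs where A raises: negative num_layers (2**num_layers is a float, so
-- range() raises TypeError), and, when num_layers > 0, a code outside the dict keys 0..2**num_layers-2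
-- (KeyError). (0 ≤ c together with bitLength(c+1) ≤ num_layers says exactly 0 ≤ c ≤ 2**num_layers - 2.)
def Pre_slot_codes_to_binary_ids (codes : List Int) (num_layers : Int) (is_outer_first : Bool) : Prop :=
  0 ≤ num_layers ∧ (num_layers = 0 ∨ ∀ c ∈ codes, 0 ≤ c ∧ (PySem.Int.bitLength (c + 1) : Int) ≤ num_layers)
instance (codes : List Int) (num_layers : Int) (is_outer_first : Bool) : Decidable (Pre_slot_codes_to_binary_ids codes num_layers is_outer_first) := by unfold Pre_slot_codes_to_binary_ids; infer_instance

def pvWitness_slot_codes_to_binary_ids : List Int × Int × Bool := ([0, 2, 1], 2, true)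

def Spec_slot_codes_to_binary_ids (codes : List Int) (num_layers : Int) (is_outer_first : Bool) (out : List Int) : Prop := out = slot_codes_to_binary_ids_alt codes num_layers is_outer_first
instance (codes : List Int) (num_layers : Int) (is_outer_first : Bool) (out : List Int) : Decidable (Spec_slot_codes_to_binary_ids codes num_layers is_outer_first out) := by unfold Spec_slot_codes_to_binary_ids; infer_instance

-- ===== CLAIM (what is proved, stated in full; the proofs are below) =====
def Claim_equal_slot_codes_to_binary_ids : Prop := ∀ (codes : List Int) (num_layers : Int) (is_outer_first : Bool), Dom_slot_codes_to_binary_ids codes num_layers is_outer_first → Pre_slot_codes_to_binary_ids codes num_layers is_outer_first → Spec_slot_codes_to_binary_ids codes num_layers is_outer_first (slot_codes_to_binary_ids codes num_layers is_outer_first)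

-- ===== LEMMAS AND PROOFS =====

-- Python's arithmetic shifts, step by step
lemma pvShiftZero (m : Int) : m >>> ((0:Int)) = m := by
  cases m with
  | ofNat a => rw [Int.ofNat_eq_natCast, ← Nat.cast_zero, Int.shiftRight_natCast]; simp
  | negSucc a => rw [← Nat.cast_zero, Int.shiftRight_negSucc]; simp

lemma pvShiftOne (m : Int) : m >>> ((1:Nat) : Int) = PySem.Int.floordiv m 2 := by
  cases m with
  | ofNat a =>
      rw [Int.ofNat_eq_natCast, Int.shiftRight_natCast]
      simp [Nat.shiftRight_succ]
  | negSucc a =>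
      rw [Int.shiftRight_negSucc]
      have h2 : (0:Int) < 2 := by norm_num
      rw [eq_comm, PySem.Int.floordiv_eq_iff_of_pos h2]
      simp only [Int.negSucc_eq, Nat.shiftRight_succ, Nat.shiftRight_zero]
      constructor <;> push_cast <;> omega

lemma pvShiftSucc (n : Int) (k : Nat) : n >>> (((k+1):Nat) : Int) = PySem.Int.floordiv (n >>> ((k:Nat):Int)) 2 := by
  have := Int.shiftRight_add' n k 1
  push_cast at this ⊢
  rw [this]
  exact pvShiftOne _

-- A's inner bit loop computes the first L bits of n (LSB first) plus the shifted remainder.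
lemma pvBitsLoop (L : Nat) (n : Int) (acc : List Int) :
    (List.range L).foldl
      (fun (st : List Int × Int) _ => (st.1 ++ [PySem.Int.mod st.2 2], PySem.Int.floordiv st.2 2))
      (acc, n)
    = (acc ++ (List.range L).map (fun k => PySem.Int.mod (n >>> ((k:Nat):Int)) 2), n >>> ((L:Nat):Int)) := by
  induction L with
  | zero => simp only [List.range_zero, List.foldl_nil, List.map_nil, List.append_nil, Nat.cast_zero, pvShiftZero]
  | succ L ih =>
      rw [List.range_succ, List.foldl_append, ih, List.map_append]
      simp only [List.foldl_cons, List.foldl_nil, List.map_cons, List.map_nil]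
      rw [pvShiftSucc]
      simp [List.append_assoc]

-- lookup into a dict built by inserting f ii at every ii of a list
lemma pvGetDFoldlInsert (f : Int → List Int) (l : List Int) (d : PySem.Dict Int (List Int)) (c : Int) :
    (l.foldl (fun d ii => d.insert ii (f ii)) d).getD c []
    = if c ∈ l then f c else d.getD c [] := by
  induction l generalizing d with
  | nil => simp
  | cons a l ih =>
      rw [List.foldl_cons, ih, PySem.Dict.getD_insert]
      by_cases h1 : c ∈ l <;> by_cases h2 : c = a <;> simp [h1, h2]

-- A's output loop over a list of known length appends the whole list
lemma pvIndexLoop (sc : List Int) (L : Nat) (h : sc.length = L) (acc : List Int) :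
    (List.range L).foldl (fun acc (ii : Nat) => acc ++ [PySem.List.pyGetD sc (ii : Int) 0]) acc = acc ++ sc := by
  rw [PySem.List.foldl_append_singleton_eq_map]
  congr 1
  subst h
  apply List.ext_getElem
  · simp
  · intro i h1 h2
    simp only [List.getElem_map, List.getElem_range]
    rw [PySem.List.pyGetD_natCast, List.getD_eq_getElem]

-- bitLength(c+1) ≤ L together with 0 ≤ c pins c into the dict key range 0..2^L-2
lemma pvCodeLt (c : Int) (L : Nat) (h0 : 0 ≤ c) (hbl : (PySem.Int.bitLength (c + 1) : Int) ≤ (L : Int)) :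
    c < (2:Int) ^ L - 1 := by
  have h1 : (c + 1).natAbs < 2 ^ PySem.Int.bitLength (c + 1) := PySem.Int.lt_two_pow_bitLength (c + 1)
  have hle : PySem.Int.bitLength (c + 1) ≤ L := by exact_mod_cast hbl
  have h2 : (2:Nat) ^ PySem.Int.bitLength (c + 1) ≤ 2 ^ L := Nat.pow_le_pow_right (by norm_num) hle
  have h3 : (c + 1).natAbs < 2 ^ L := lt_of_lt_of_le h1 h2
  have h4 : ((c + 1).natAbs : Int) = c + 1 := Int.natAbs_of_nonneg (by omega)
  have h5 : (c + 1 : Int) < ((2 ^ L : Nat) : Int) := by rw [← h4]; exact_mod_cast h3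
  have h6 : ((2 ^ L : Nat) : Int) = (2:Int) ^ L := by push_cast; ring
  omega

-- ===== VERDICT (by name: the statement is the Claim_ definition above) =====
theorem slot_codes_to_binary_ids_spec : Claim_equal_slot_codes_to_binary_ids := by
  intro codes num_layers is_outer_first _ hpre
  unfold Spec_slot_codes_to_binary_ids slot_codes_to_binary_ids slot_codes_to_binary_ids_alt
  obtain ⟨hL, hrest⟩ := hpre
  rcases hrest with h0 | hall
  · subst h0
    simp
  · apply PySem.List.foldl_congr_mem
    intro acc code hmem
    obtain ⟨hc0, hbl⟩ := hall code hmem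
    have hLnat : ((num_layers.toNat : Int)) = num_layers := Int.toNat_of_nonneg hL
    have hlt : code < (2:Int) ^ num_layers.toNat - 1 := by
      apply pvCodeLt code num_layers.toNat hc0
      rw [hLnat]; exact hbl
    simp only []
    rw [pvGetDFoldlInsert (fun ii =>
      if is_outer_first then
        (((List.range num_layers.toNat).foldl
          (fun (st : List Int × Int) _ => (st.1 ++ [PySem.Int.mod st.2 2], PySem.Int.floordiv st.2 2))
          (([] : List Int), ii + 1)).1).reverse
      else
        ((List.range num_layers.toNat).foldl
          (fun (st : List Int × Int) _ => (st.1 ++ [PySem.Int.mod st.2 2], PySem.Int.floordiv st.2 2))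
          (([] : List Int), ii + 1)).1)]
    have hmemr : code ∈ PySem.List.pyRange 0 ((2 : Int) ^ num_layers.toNat - 1) 1 := by
      rw [PySem.List.mem_pyRange_one]; exact ⟨hc0, hlt⟩
    rw [if_pos hmemr, pvBitsLoop]
    have hlen : (if is_outer_first then
        (([] ++ (List.range num_layers.toNat).map (fun k => PySem.Int.mod ((code + 1) >>> ((k:Nat):Int)) 2) : List Int)).reverse
      else
        ([] ++ (List.range num_layers.toNat).map (fun k => PySem.Int.mod ((code + 1) >>> ((k:Nat):Int)) 2) : List Int)).length
        = num_layers.toNat := by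
      split <;> simp
    rw [pvIndexLoop _ _ hlen]
    congr 1
    have hbits : (List.range num_layers.toNat).map (fun k => PySem.Int.mod ((code + 1) >>> ((k:Nat):Int)) 2)
        = (List.range num_layers.toNat).map (fun (k : Nat) => PySem.Int.band ((code + 1) >>> (k : Int)) 1) := by
      apply List.map_congr_left
      intro k _
      rw [PySem.Int.band_one]
    simp only [List.nil_append]
    rw [hbits]
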